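-- pv_equiv track=rewrite | github.com/truongdo619/GRAM | dataset/GRAM_dataset.py | find_parent_entity
-- ===== SOURCE A (Python) =====
-- def find_parent_entity(words):
--     parent_entity = "ROOT"
--     count_close_brackets = 0
--     for word in reversed(words):
--         if word.startswith("]"):
--             count_close_brackets += 1
--
--         if word.startswith("["):
--             if count_close_brackets == 0:
--                 parent_entity = word[1:]
--                 break
--             else:
--                 count_close_brackets -= 1
--     return parent_entity
-- ===== SOURCE B (Python) =====
-- def find_parent_entity(words):
--     stack = []
--     for word in words:
--         if word.startswith("["):
--             stack.append(word[1:])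
--         elif word.startswith("]"):
--             if stack:
--                 stack.pop()
--     return stack[-1] if stack else "ROOT"
-- ===== Notes on version B (the rewrite author's own statement) =====
-- stated objective: idiomatic
-- what changed: Replaces the backward scan with a close-bracket counter and break by a single forward pass maintaining an explicit stack of open entity names, returning the top of the stack (or ROOT if empty).
import Mathlib
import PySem

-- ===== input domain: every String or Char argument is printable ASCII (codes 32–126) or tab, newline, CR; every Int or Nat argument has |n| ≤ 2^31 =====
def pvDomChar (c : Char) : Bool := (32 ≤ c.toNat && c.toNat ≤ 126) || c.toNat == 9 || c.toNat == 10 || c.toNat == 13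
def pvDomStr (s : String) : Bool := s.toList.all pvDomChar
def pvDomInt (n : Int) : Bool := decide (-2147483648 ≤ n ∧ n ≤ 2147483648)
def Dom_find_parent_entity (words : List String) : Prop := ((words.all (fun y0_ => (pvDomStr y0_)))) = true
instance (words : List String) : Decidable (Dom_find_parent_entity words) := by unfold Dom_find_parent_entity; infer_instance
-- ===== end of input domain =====

-- B replaces A's backward counter-and-break scan by a forward pass with an explicit stack of open entity names (idiomatic bracket matching); same O(n) cost.


-- ===== PORT A =====
-- loop body of A: processes the reversed word list with the close-bracket counter; an empty list = loop fell through, break = returning word[1:]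
def pvALoop : List String → Int → String
  | [], _ => "ROOT"
  | w :: rest, c =>
    let c1 := if PySem.Str.startswith w "]" then c + 1 else c
    if PySem.Str.startswith w "[" then
      if c1 = 0 then PySem.Str.slice w (some 1) none
      else pvALoop rest (c1 - 1)
    else pvALoop rest c1

def find_parent_entity (words : List String) : String :=
  pvALoop words.reverse 0

-- ===== PORT B =====
-- loop body of B: push word[1:] on '[', pop (if non-empty) on ']', stack top at the END of the list as in Source B
def pvBStep (stack : List String) (w : String) : List String :=
  if PySem.Str.startswith w "[" then stack ++ [PySem.Str.slice w (some 1) none]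
  else if PySem.Str.startswith w "]" then stack.dropLast
  else stack

def find_parent_entity_alt (words : List String) : String :=
  ((words.foldl pvBStep []).getLast?).getD "ROOT"

-- ===== PRECONDITION & SPEC =====
def Spec_find_parent_entity (words : List String) (out : String) : Prop := out = find_parent_entity_alt words
instance (words : List String) (out : String) : Decidable (Spec_find_parent_entity words out) := by unfold Spec_find_parent_entity; infer_instance

-- ===== CLAIM (what is proved, stated in full; the proofs are below) =====
def Claim_equal_find_parent_entity : Prop := ∀ (words : List String), Dom_find_parent_entity words → Spec_find_parent_entity words (find_parent_entity words)

-- ===== LEMMAS AND PROOFS =====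

-- head-at-front mirror of B's stack, used only in the proof
def pvHStep (stack : List String) (w : String) : List String :=
  if PySem.Str.startswith w "[" then PySem.Str.slice w (some 1) none :: stack
  else if PySem.Str.startswith w "]" then stack.tail
  else stack

theorem pvStartswith_exclusive (w : String) (h : PySem.Str.startswith w "]" = true) :
    PySem.Str.startswith w "[" = false := by
  simp only [PySem.Str.startswith_eq] at h ⊢
  rw [PySem.Chars.startswith_iff] at h
  rw [← Bool.not_eq_true, PySem.Chars.startswith_iff]
  rcases h with ⟨t1, h1⟩
  rintro ⟨t2, h2⟩
  rw [← h1] at h2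
  simp at h2

theorem pvBStep_eq_reverse_hStep (s : List String) (w : String) :
    pvBStep s w = (pvHStep s.reverse w).reverse := by
  unfold pvBStep pvHStep
  split_ifs <;> simp

theorem pvFoldB_eq_reverse_foldH (ws : List String) :
    ws.foldl pvBStep [] = (ws.reverse.foldr (fun w s => pvHStep s w) []).reverse := by
  induction ws using List.reverseRecOn with
  | nil => simp
  | append_singleton t w ih =>
      simp only [List.foldl_append, List.foldl_cons, List.foldl_nil, List.reverse_append,
        List.reverse_cons, List.reverse_nil, List.nil_append, List.singleton_append,
        List.foldr_cons, ih, pvBStep_eq_reverse_hStep, List.reverse_reverse]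

-- the core invariant: the backward scan with counter c reads off the forward stack at depth c
theorem pvALoop_eq_stack (l : List String) (c : Nat) :
    pvALoop l (c : Int) = ((l.foldr (fun w s => pvHStep s w) [])[c]?).getD "ROOT" := by
  induction l generalizing c with
  | nil => simp [pvALoop]
  | cons w t ih =>
      rw [List.foldr_cons]
      by_cases hcl : PySem.Str.startswith w "]" = true
      · have hop := pvStartswith_exclusive w hcl
        have h1 : (c : Int) + 1 = ((c + 1 : Nat) : Int) := by push_cast; ring
        have hstep : pvHStep (t.foldr (fun w s => pvHStep s w) []) w
            = (t.foldr (fun w s => pvHStep s w) []).tail := by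
          unfold pvHStep; rw [hop, hcl]; simp
        rw [hstep]
        simp only [pvALoop, hcl, hop, Bool.false_eq_true, if_true, if_false]
        rw [h1, ih (c + 1), List.getElem?_tail]
      · by_cases hop : PySem.Str.startswith w "[" = true
        · have hstep : pvHStep (t.foldr (fun w s => pvHStep s w) []) w
              = PySem.Str.slice w (some 1) none :: t.foldr (fun w s => pvHStep s w) [] := by
            unfold pvHStep; rw [hop]; simp
          rw [hstep]
          simp only [pvALoop, hcl, hop, Bool.false_eq_true, if_false, if_true]
          cases c with
          | zero => simp
          | succ n =>
              have hne : ((n + 1 : Nat) : Int) ≠ 0 := by omega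
              have h2 : ((n + 1 : Nat) : Int) - 1 = (n : Int) := by push_cast; ring
              rw [if_neg hne, h2, ih n]
              simp
        · have hstep : pvHStep (t.foldr (fun w s => pvHStep s w) []) w
              = t.foldr (fun w s => pvHStep s w) [] := by
            unfold pvHStep; rw [if_neg hop, if_neg hcl]
          rw [hstep]
          simp only [pvALoop, hcl, hop, Bool.false_eq_true, if_false]
          exact ih c

-- ===== VERDICT (by name: the statement is the Claim_ definition above) =====
theorem find_parent_entity_spec : Claim_equal_find_parent_entity := by
  intro words _
  unfold Spec_find_parent_entity find_parent_entity find_parent_entity_alt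
  rw [pvFoldB_eq_reverse_foldH]
  have h := pvALoop_eq_stack words.reverse 0
  simp only [Nat.cast_zero] at h
  rw [h]
  rcases hs : words.reverse.foldr (fun w s => pvHStep s w) [] with _ | ⟨x, t⟩ <;> simp
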